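-- pv_equiv track=rewrite | github.com/jh990714/BaekJoon-Algorithm | 프로그래머스/2/340211. ［PCCP 기출문제］ 3번 ／ 충돌위험 찾기/［PCCP 기출문제］ 3번 ／ 충돌위험 찾기.py | solution
-- ===== SOURCE A (Python) =====
-- def solution(points, routes):
--     visited_count = {}
--
--     for route in routes:
--         path = findPath(points, route)
--
--         for point in path:
--             if point in visited_count:
--                 visited_count[point] += 1
--             else:
--                 visited_count[point] = 1
--
--     answer = 0
--     for key, count in visited_count.items():
--         if count >= 2:
--             answer += 1
--
--     return answer
--
-- def findPath(points, route):
--     time = 0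
--     path = set()
--
--     for i in range(len(route) - 1):
--         start, end = points[route[i]-1], points[route[i+1]-1]
--         x, y = start
--
--         while x != end[0]:
--             path.add((x, y, time))
--
--             if x > end[0]:
--                 x -= 1
--             else:
--                 x += 1
--
--             time += 1
--
--         while y != end[1]:
--             path.add((x, y, time))
--
--             if y > end[1]:
--                 y -= 1
--             else:
--                 y += 1
--
--             time += 1
--
--
--         path.add((end[0], end[1], time))
--
--     return path
-- ===== SOURCE B (Python) =====
-- def solution(points, routes):
--     # Time-major simulation: advance all robots one tick at a time and count,
--     # per tick, the cells occupied by at least two robots.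
--     robots = []
--     for route in routes:
--         if len(route) >= 2:
--             x, y = points[route[0] - 1]
--             targets = [(points[i - 1][0], points[i - 1][1]) for i in route[1:]]
--             robots.append(((x, y), targets))
--     answer = 0
--     while robots:
--         seen = set()
--         dup = set()
--         for pos, _ in robots:
--             if pos in seen:
--                 dup.add(pos)
--             else:
--                 seen.add(pos)
--         answer += len(dup)
--         moved = []
--         for pos, targets in robots:
--             while targets and pos == targets[0]:
--                 targets = targets[1:]
--             if targets:
--                 tx, ty = targets[0]
--                 x, y = pos
--                 if x != tx:
--                     x = x + 1 if tx > x else x - 1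
--                 else:
--                     y = y + 1 if ty > y else y - 1
--                 moved.append(((x, y), targets))
--         robots = moved
--     return answer
-- ===== Notes on version B (the rewrite author's own statement) =====
-- stated objective: alternative
-- what changed: B replaces A's route-by-route path-set accumulation plus global count-dict and final >=2 scan by a time-major simulation: all robots advance one cell per tick simultaneously, and each tick adds the number of cells currently occupied by at least two robots.
import Mathlib
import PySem

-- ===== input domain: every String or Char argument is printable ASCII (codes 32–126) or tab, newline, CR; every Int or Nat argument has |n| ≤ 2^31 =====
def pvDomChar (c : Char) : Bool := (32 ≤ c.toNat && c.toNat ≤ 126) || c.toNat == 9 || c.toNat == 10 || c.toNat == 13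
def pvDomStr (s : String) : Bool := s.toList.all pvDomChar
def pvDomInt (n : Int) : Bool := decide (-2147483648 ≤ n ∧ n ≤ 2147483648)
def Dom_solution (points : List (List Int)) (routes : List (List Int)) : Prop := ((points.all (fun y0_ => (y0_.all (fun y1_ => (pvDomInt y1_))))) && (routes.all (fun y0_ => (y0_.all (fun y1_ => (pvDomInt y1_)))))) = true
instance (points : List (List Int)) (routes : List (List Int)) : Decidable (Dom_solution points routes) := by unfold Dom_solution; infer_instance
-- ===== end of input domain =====

-- B replaces A's route-by-route path-set accumulation and count-dict by a time-major simulation: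
-- all robots advance one tick at a time and each tick contributes the number of cells holding ≥ 2 robots.

-- ===== PORT A =====

-- 'while x != end[0]' loop of findPath (fuel = |x - end[0]|, the exact iteration count)
def pvWalkX : Nat → Int → Int → Int → Int → PySem.Set (Int × Int × Int) →
    Int × Int × PySem.Set (Int × Int × Int)
  | 0, x, _, _, time, path => (x, time, path)
  | fuel + 1, x, y, ex, time, path =>
    if x = ex then (x, time, path)
    else
      let path' := PySem.Set.add path (x, y, time)
      if x > ex then pvWalkX fuel (x - 1) y ex (time + 1) path'
      else pvWalkX fuel (x + 1) y ex (time + 1) path'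

-- 'while y != end[1]' loop of findPath (fuel = |y - end[1]|)
def pvWalkY : Nat → Int → Int → Int → Int → PySem.Set (Int × Int × Int) →
    Int × Int × PySem.Set (Int × Int × Int)
  | 0, _, y, _, time, path => (y, time, path)
  | fuel + 1, x, y, ey, time, path =>
    if y = ey then (y, time, path)
    else
      let path' := PySem.Set.add path (x, y, time)
      if y > ey then pvWalkY fuel x (y - 1) ey (time + 1) path'
      else pvWalkY fuel x (y + 1) ey (time + 1) path'

-- findPath(points, route); none = a raise (IndexError / unpacking ValueError)
def pvFindPath (points : List (List Int)) (route : List Int) :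
    Option (PySem.Set (Int × Int × Int)) :=
  ((PySem.List.pyRange 0 ((route.length : Int) - 1) 1).foldl
    (fun st i =>
      match st with
      | none => none
      | some (time, path) =>
        match PySem.List.pyGet? route i, PySem.List.pyGet? route (i + 1) with
        | some ri, some rj =>
          match PySem.List.pyGet? points (ri - 1), PySem.List.pyGet? points (rj - 1) with
          | some start, some stop =>
            match start with
            | [x, y] =>
              match PySem.List.pyGet? stop 0, PySem.List.pyGet? stop 1 with
              | some e0, some e1 =>
                match pvWalkX ((x - e0).natAbs) x y e0 time path with
                | (x1, t1, p1) =>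
                  match pvWalkY ((y - e1).natAbs) x1 y e1 t1 p1 with
                  | (_, t2, p2) => some (t2, PySem.Set.add p2 (e0, e1, t2))
              | _, _ => none
            | _ => none
          | _, _ => none
        | _, _ => none)
    (some (0, PySem.Set.empty))).map (·.2)

def solution (points : List (List Int)) (routes : List (List Int)) : Int :=
  let res := routes.foldl
    (fun st route =>
      match st with
      | none => none
      | some d =>
        match pvFindPath points route with
        | none => none
        | some path =>
          some (path.foldl
            (fun d point =>
              match PySem.Dict.get? d point with
              | some c => PySem.Dict.insert d point (c + 1)
              | none => PySem.Dict.insert d point 1) d))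
    (some (PySem.Dict.empty : PySem.Dict (Int × Int × Int) Int))
  match res with
  | none => 0
  | some vc => vc.items.foldl (fun answer kc => if kc.2 ≥ 2 then answer + 1 else answer) 0

-- ===== PORT B =====

-- '(points[i-1][0], points[i-1][1]) for i in route[1:]'; none = a raise
def pvMkTargets (points : List (List Int)) (rest : List Int) : Option (List (Int × Int)) :=
  rest.mapM (fun i =>
    match PySem.List.pyGet? points (i - 1) with
    | some p =>
      match PySem.List.pyGet? p 0, PySem.List.pyGet? p 1 with
      | some px, some py => some (px, py)
      | _, _ => none
    | none => none)

-- the robot-building loop; none = a raise (unpacking points[route[0]-1] / IndexError)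
def pvInitRobots (points : List (List Int)) (routes : List (List Int)) :
    Option (List ((Int × Int) × List (Int × Int))) :=
  routes.foldl
    (fun st route =>
      match st with
      | none => none
      | some rs =>
        if 2 ≤ route.length then
          match route with
          | a :: rest =>
            match PySem.List.pyGet? points (a - 1) with
            | some [x, y] =>
              match pvMkTargets points rest with
              | some ts => some (rs ++ [((x, y), ts)])
              | none => none
            | _ => none
          | [] => none
        else some rs)
    (some [])

-- the per-tick seen/dup counting loop; returns len(dup)
def pvDupCount (robots : List ((Int × Int) × List (Int × Int))) : Int :=
  PySem.Set.len
    (robots.foldl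
      (fun (sd : PySem.Set (Int × Int) × PySem.Set (Int × Int)) r =>
        if PySem.Set.contains sd.1 r.1 then (sd.1, PySem.Set.add sd.2 r.1)
        else (PySem.Set.add sd.1 r.1, sd.2))
      (PySem.Set.empty, PySem.Set.empty)).2

-- 'while targets and pos == targets[0]: targets = targets[1:]'
def pvPopDup (pos : Int × Int) : List (Int × Int) → List (Int × Int)
  | [] => []
  | t :: ts => if pos = t then pvPopDup pos ts else t :: ts

-- one robot's step of the tick: pop reached waypoints, then move one cell (x first), none = robot done
def pvMoveRobot (r : (Int × Int) × List (Int × Int)) :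
    Option ((Int × Int) × List (Int × Int)) :=
  match pvPopDup r.1 r.2 with
  | [] => none
  | (tx, ty) :: ts =>
    if r.1.1 ≠ tx then
      (if tx > r.1.1 then some ((r.1.1 + 1, r.1.2), (tx, ty) :: ts)
       else some ((r.1.1 - 1, r.1.2), (tx, ty) :: ts))
    else
      (if ty > r.1.2 then some ((r.1.1, r.1.2 + 1), (tx, ty) :: ts)
       else some ((r.1.1, r.1.2 - 1), (tx, ty) :: ts))

-- the 'moved = []; for ...: moved.append(...)' loop
def pvMoveAll (robots : List ((Int × Int) × List (Int × Int))) :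
    List ((Int × Int) × List (Int × Int)) :=
  robots.foldl
    (fun moved r =>
      match pvMoveRobot r with
      | some r' => moved ++ [r']
      | none => moved) []

-- remaining step count of one robot (termination measure only)
def pvSteps : (Int × Int) → List (Int × Int) → Nat
  | _, [] => 0
  | p, t :: ts => (p.1 - t.1).natAbs + (p.2 - t.2).natAbs + pvSteps t ts

def pvMeasure (robots : List ((Int × Int) × List (Int × Int))) : Nat :=
  (robots.map (fun r => 1 + pvSteps r.1 r.2)).sum

-- 'while robots:' — one recursive call per tick (fuel = pvMeasure, a strict upper bound
-- on the tick count: pvMeasure_moveAll_lt shows it drops every tick)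
def pvSimAux : Nat → List ((Int × Int) × List (Int × Int)) → Int
  | 0, _ => 0
  | fuel + 1, robots =>
    if robots = [] then 0
    else pvDupCount robots + pvSimAux fuel (pvMoveAll robots)

def pvSim (robots : List ((Int × Int) × List (Int × Int))) : Int :=
  pvSimAux (pvMeasure robots) robots

def solution_alt (points : List (List Int)) (routes : List (List Int)) : Int :=
  match pvInitRobots points routes with
  | some robots => pvSim robots
  | none => 0

-- ===== PRECONDITION & SPEC =====
-- Pre_ is exactly A's non-raising domain: for every route of length ≥ 2, every referenced
-- point index is in range, every point unpacked as a segment start (all but the last route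
-- point) is exactly a pair, and the last route point has at least two coordinates.
def Pre_solution (points : List (List Int)) (routes : List (List Int)) : Prop :=
  ∀ r ∈ routes, 2 ≤ r.length →
    (∀ a ∈ r.dropLast, (PySem.List.pyGet? points (a - 1)).map List.length = some 2) ∧
    (∀ a ∈ r.getLast?, 2 ≤ ((PySem.List.pyGet? points (a - 1)).getD []).length)
instance (points : List (List Int)) (routes : List (List Int)) : Decidable (Pre_solution points routes) := by
  unfold Pre_solution; infer_instance

def pvWitness_solution : List (List Int) × List (List Int) :=
  ([[0, 0], [0, 2], [2, 2]], [[1, 2, 3], [3, 1]])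

def Spec_solution (points : List (List Int)) (routes : List (List Int)) (out : Int) : Prop := out = solution_alt points routes
instance (points : List (List Int)) (routes : List (List Int)) (out : Int) : Decidable (Spec_solution points routes out) := by unfold Spec_solution; infer_instance

-- ===== CLAIM (what is proved, stated in full; the proofs are below) =====
def Claim_equal_solution : Prop := ∀ (points : List (List Int)) (routes : List (List Int)), Dom_solution points routes → Pre_solution points routes → Spec_solution points routes (solution points routes)

-- ===== LEMMAS AND PROOFS =====

theorem pvSteps_popDup (pos : Int × Int) (ts : List (Int × Int)) :
    pvSteps pos (pvPopDup pos ts) = pvSteps pos ts := by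
  induction ts with
  | nil => rfl
  | cons t ts ih =>
    by_cases h : pos = t
    · subst h
      rw [pvPopDup, if_pos rfl, ih]
      simp only [pvSteps]
      omega
    · simp [pvPopDup, h]

theorem pvPopDup_head_ne (pos : Int × Int) (ts : List (Int × Int)) {t : Int × Int}
    {ts0 : List (Int × Int)} (h : pvPopDup pos ts = t :: ts0) : pos ≠ t := by
  induction ts with
  | nil => simp [pvPopDup] at h
  | cons a ts ih =>
    by_cases ha : pos = a
    · subst ha; rw [pvPopDup, if_pos rfl] at h; exact ih h
    · rw [pvPopDup, if_neg ha] at h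
      cases h; exact ha

theorem pvMove_steps_lt {r r' : (Int × Int) × List (Int × Int)}
    (h : pvMoveRobot r = some r') : pvSteps r'.1 r'.2 < pvSteps r.1 r.2 := by
  unfold pvMoveRobot at h
  cases hp : pvPopDup r.1 r.2 with
  | nil => rw [hp] at h; cases h
  | cons t ts0 =>
    obtain ⟨tx, ty⟩ := t
    rw [hp] at h
    simp only at h
    have hne : r.1 ≠ (tx, ty) := pvPopDup_head_ne r.1 r.2 hp
    have hs : pvSteps r.1 ((tx, ty) :: ts0) = pvSteps r.1 r.2 := by
      rw [← hp, pvSteps_popDup]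
    simp only [pvSteps] at hs
    by_cases hx : r.1.1 ≠ tx
    · rw [if_pos hx] at h
      by_cases hgt : tx > r.1.1
      · rw [if_pos hgt] at h; cases h; simp only [pvSteps]; omega
      · rw [if_neg hgt] at h; cases h; simp only [pvSteps]; omega
    · rw [if_neg hx] at h
      push_neg at hx
      have hy : r.1.2 ≠ ty := by
        intro hy; exact hne (Prod.ext hx hy)
      by_cases hgt : ty > r.1.2
      · rw [if_pos hgt] at h; cases h; simp only [pvSteps]; omega
      · rw [if_neg hgt] at h; cases h; simp only [pvSteps]; omega

theorem pvMoveAll_eq (robots : List ((Int × Int) × List (Int × Int))) :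
    pvMoveAll robots = robots.filterMap pvMoveRobot := by
  have gen : ∀ (l : List ((Int × Int) × List (Int × Int))) acc,
      l.foldl (fun moved r => match pvMoveRobot r with
        | some r' => moved ++ [r'] | none => moved) acc = acc ++ l.filterMap pvMoveRobot := by
    intro l
    induction l with
    | nil => intro acc; simp
    | cons r rest ih =>
      intro acc
      rw [List.foldl_cons, List.filterMap_cons]
      cases h : pvMoveRobot r with
      | none => simp [h, ih]
      | some r' => simp [h, ih]
  exact gen robots []

theorem pvMeasure_filterMap_le (robots : List ((Int × Int) × List (Int × Int))) :
    pvMeasure (robots.filterMap pvMoveRobot) ≤ pvMeasure robots := by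
  induction robots with
  | nil => exact le_refl _
  | cons r rest ih =>
    rw [List.filterMap_cons]
    cases h : pvMoveRobot r with
    | none => simp only [pvMeasure, List.map_cons, List.sum_cons] at *; omega
    | some r' =>
      have := pvMove_steps_lt h
      simp only [pvMeasure, List.map_cons, List.sum_cons] at *
      omega

theorem pvMeasure_moveAll_lt {robots : List ((Int × Int) × List (Int × Int))}
    (h : ¬ robots = []) : pvMeasure (pvMoveAll robots) < pvMeasure robots := by
  rw [pvMoveAll_eq]
  cases robots with
  | nil => exact absurd rfl h
  | cons r rest =>
    rw [List.filterMap_cons]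
    have hle := pvMeasure_filterMap_le rest
    cases hm : pvMoveRobot r with
    | none => simp only [pvMeasure, List.map_cons, List.sum_cons] at *; omega
    | some r' =>
      have := pvMove_steps_lt hm
      simp only [pvMeasure, List.map_cons, List.sum_cons] at *
      omega

-- ---------- generic small lemmas ----------

-- one step of a robot toward target e (x first), the common step of both programs
def pvStepTo (pos e : Int × Int) : Int × Int :=
  if pos.1 ≠ e.1 then (if e.1 > pos.1 then (pos.1 + 1, pos.2) else (pos.1 - 1, pos.2))
  else (if e.2 > pos.2 then (pos.1, pos.2 + 1) else (pos.1, pos.2 - 1))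

theorem pvMove_nil (pos : Int × Int) : pvMoveRobot (pos, []) = none := rfl

theorem pvMove_pop {pos e : Int × Int} (ts : List (Int × Int)) (h : pos = e) :
    pvMoveRobot (pos, e :: ts) = pvMoveRobot (pos, ts) := by
  unfold pvMoveRobot
  simp only [pvPopDup, if_pos h]

theorem pvMove_cons_ne {pos e : Int × Int} (ts : List (Int × Int)) (h : pos ≠ e) :
    pvMoveRobot (pos, e :: ts) = some (pvStepTo pos e, e :: ts) := by
  unfold pvMoveRobot pvStepTo
  simp only [pvPopDup, if_neg h]
  obtain ⟨ex, ey⟩ := e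
  by_cases hx : pos.1 ≠ ex
  · rw [if_pos hx, if_pos hx]
    by_cases hgt : ex > pos.1
    · rw [if_pos hgt, if_pos hgt]
    · rw [if_neg hgt, if_neg hgt]
  · rw [if_neg hx, if_neg hx]
    have hy : pos.2 ≠ ey := by
      intro hy; push_neg at hx; exact h (Prod.ext hx hy)
    by_cases hgt : ey > pos.2
    · rw [if_pos hgt, if_pos hgt]
    · rw [if_neg hgt, if_neg hgt]

-- position list of one robot over time (head = current position)
def pvTrace (pos : Int × Int) (ts : List (Int × Int)) : List (Int × Int) :=
  pos :: (if h : (pvMoveRobot (pos, ts)).isSome then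
            pvTrace ((pvMoveRobot (pos, ts)).get h).1 ((pvMoveRobot (pos, ts)).get h).2
          else [])
termination_by pvSteps pos ts
decreasing_by exact pvMove_steps_lt (Option.some_get h).symm

theorem pvTrace_of_none {pos : Int × Int} {ts : List (Int × Int)}
    (h : pvMoveRobot (pos, ts) = none) : pvTrace pos ts = [pos] := by
  rw [pvTrace]; simp [h]

theorem pvTrace_of_some {pos : Int × Int} {ts : List (Int × Int)}
    {r : (Int × Int) × List (Int × Int)} (h : pvMoveRobot (pos, ts) = some r) :
    pvTrace pos ts = pos :: pvTrace r.1 r.2 := by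
  rw [pvTrace]; simp [h]

theorem pvTrace_pop {pos e : Int × Int} (ts : List (Int × Int)) (h : pos = e) :
    pvTrace pos (e :: ts) = pvTrace pos ts := by
  rw [pvTrace, pvTrace]
  simp only [pvMove_pop ts h]

-- the cells a robot's x-then-y walk toward e passes through, endpoint excluded
def pvSegX (x y ex : Int) : List (Int × Int) :=
  if h : x = ex then [] else (x, y) :: pvSegX (if ex > x then x + 1 else x - 1) y ex
termination_by (x - ex).natAbs
decreasing_by split <;> omega

def pvSegY (x y ey : Int) : List (Int × Int) :=
  if h : y = ey then [] else (x, y) :: pvSegY x (if ey > y then y + 1 else y - 1) ey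
termination_by (y - ey).natAbs
decreasing_by split <;> omega

def pvSegPos (s e : Int × Int) : List (Int × Int) :=
  pvSegX s.1 s.2 e.1 ++ pvSegY e.1 s.2 e.2

-- whole position list of a robot, segment by segment
def pvChain (pos : Int × Int) : List (Int × Int) → List (Int × Int)
  | [] => [pos]
  | e :: ts => pvSegPos pos e ++ pvChain e ts

theorem pvSegX_len (x y ex : Int) : (pvSegX x y ex).length = (x - ex).natAbs := by
  by_cases h : x = ex
  · rw [pvSegX, dif_pos h]; simp [h]
  · rw [pvSegX, dif_neg h]
    by_cases hgt : ex > x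
    · rw [if_pos hgt, List.length_cons, pvSegX_len]; omega
    · rw [if_neg hgt, List.length_cons, pvSegX_len]; omega
termination_by (x - ex).natAbs
decreasing_by all_goals omega

theorem pvSegY_len (x y ey : Int) : (pvSegY x y ey).length = (y - ey).natAbs := by
  by_cases h : y = ey
  · rw [pvSegY, dif_pos h]; simp [h]
  · rw [pvSegY, dif_neg h]
    by_cases hgt : ey > y
    · rw [if_pos hgt, List.length_cons, pvSegY_len]; omega
    · rw [if_neg hgt, List.length_cons, pvSegY_len]; omega
termination_by (y - ey).natAbs
decreasing_by all_goals omega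

theorem pvSegPos_self (p : Int × Int) : pvSegPos p p = [] := by
  unfold pvSegPos
  rw [pvSegX, dif_pos rfl, pvSegY, dif_pos rfl]
  rfl

theorem pvSegPos_step {pos e : Int × Int} (h : pos ≠ e) :
    pvSegPos pos e = pos :: pvSegPos (pvStepTo pos e) e := by
  obtain ⟨px, py⟩ := pos
  obtain ⟨ex, ey⟩ := e
  simp only [pvSegPos, pvStepTo, ne_eq]
  by_cases hx : px = ex
  · subst hx
    have hy : py ≠ ey := fun hy => h (by rw [hy])
    simp only [not_true_eq_false, if_false]
    conv_lhs => rw [pvSegX, dif_pos rfl, pvSegY, dif_neg hy]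
    by_cases hgt : ey > py
    · simp only [if_pos hgt]
      conv_rhs => rw [pvSegX, dif_pos rfl]
      simp
    · simp only [if_neg hgt]
      conv_rhs => rw [pvSegX, dif_pos rfl]
      simp
  · simp only [hx, not_false_eq_true, if_true]
    conv_lhs => rw [pvSegX, dif_neg hx]
    by_cases hgt : ex > px
    · simp only [if_pos hgt, List.cons_append]
    · simp only [if_neg hgt, List.cons_append]

theorem pvChain_cons (ts : List (Int × Int)) (pos : Int × Int) :
    ∃ tl, pvChain pos ts = pos :: tl := by
  induction ts generalizing pos with
  | nil => exact ⟨[], rfl⟩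
  | cons e ts ih =>
    by_cases h : pos = e
    · subst h
      obtain ⟨tl, htl⟩ := ih pos
      exact ⟨tl, by rw [pvChain, pvSegPos_self, List.nil_append, htl]⟩
    · rw [pvChain, pvSegPos_step h, List.cons_append]
      exact ⟨_, rfl⟩

theorem pvTrace_eq_chain : ∀ (N : Nat) (ts : List (Int × Int)) (pos : Int × Int),
    pvSteps pos ts + ts.length ≤ N → pvTrace pos ts = pvChain pos ts := by
  intro N
  induction N with
  | zero =>
    intro ts pos h
    match ts, h with
    | [], _ => rw [pvTrace_of_none (pvMove_nil pos)]; rfl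
  | succ N ih =>
    intro ts pos h
    match ts with
    | [] => rw [pvTrace_of_none (pvMove_nil pos)]; rfl
    | e :: ts' =>
      by_cases hpe : pos = e
      · subst hpe
        rw [pvTrace_pop ts' rfl, pvChain, pvSegPos_self, List.nil_append]
        apply ih
        have hs : pvSteps pos (pos :: ts') = pvSteps pos ts' := by simp [pvSteps]
        rw [hs, List.length_cons] at h
        omega
      · rw [pvTrace_of_some (pvMove_cons_ne ts' hpe), pvChain, pvSegPos_step hpe,
          List.cons_append, ← pvChain]
        congr 1
        have hmv := pvMove_steps_lt (pvMove_cons_ne ts' hpe)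
        simp only at hmv
        have := ih (e :: ts') (pvStepTo pos e) (by simp only [List.length_cons] at h ⊢; omega)
        rw [this, pvChain]

-- (x, y, time) triples of a position list, consecutive times from T
def pvEnum (T : Int) : List (Int × Int) → List (Int × Int × Int)
  | [] => []
  | p :: ps => (p.1, p.2, T) :: pvEnum (T + 1) ps

theorem pvEnum_append (T : Int) (l1 l2 : List (Int × Int)) :
    pvEnum T (l1 ++ l2) = pvEnum T l1 ++ pvEnum (T + l1.length) l2 := by
  induction l1 generalizing T with
  | nil => simp [pvEnum]
  | cons p ps ih =>
    simp only [List.cons_append, pvEnum, ih, List.length_cons]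
    congr 2
    push_cast
    ring

theorem pvEnum_time_ge {T : Int} {l : List (Int × Int)} {z : Int × Int × Int}
    (h : z ∈ pvEnum T l) : T ≤ z.2.2 := by
  induction l generalizing T with
  | nil => simp [pvEnum] at h
  | cons p ps ih =>
    simp only [pvEnum, List.mem_cons] at h
    rcases h with h | h
    · subst h; simp
    · have := ih h; omega

theorem pvEnum_shift (l : List (Int × Int)) (T : Int) :
    pvEnum (T + 1) l = (pvEnum T l).map (fun z => (z.1, z.2.1, z.2.2 + 1)) := by
  induction l generalizing T with
  | nil => rfl
  | cons p ps ih => simp only [pvEnum, List.map_cons, ih]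

theorem pvEnum_nodup (l : List (Int × Int)) (T : Int) : (pvEnum T l).Nodup := by
  induction l generalizing T with
  | nil => exact List.nodup_nil
  | cons p ps ih =>
    simp only [pvEnum, List.nodup_cons]
    refine ⟨fun hmem => ?_, ih (T + 1)⟩
    have := pvEnum_time_ge hmem
    simp at this

-- ---------- A-side: walk loops produce exactly the enumerated segment triples ----------

theorem pvWalkX_spec : ∀ (n : Nat) (x y ex t : Int) (p : PySem.Set (Int × Int × Int)),
    (x - ex).natAbs = n →
    pvWalkX n x y ex t p = (ex, t + n, PySem.Set.update p (pvEnum t (pvSegX x y ex))) := by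
  intro n
  induction n with
  | zero =>
    intro x y ex t p h
    have hx : x = ex := by omega
    rw [pvSegX, dif_pos hx]
    simp only [pvWalkX, pvEnum, PySem.Set.update, List.foldl_nil]
    simp [hx]
  | succ m ih =>
    intro x y ex t p h
    have hne : x ≠ ex := by omega
    rw [pvSegX, dif_neg hne]
    simp only [pvWalkX, if_neg hne, pvEnum, PySem.Set.update, List.foldl_cons]
    by_cases hgt : x > ex
    · rw [if_pos hgt, if_neg (by omega : ¬ ex > x), ih (x-1) y ex (t+1) _ (by omega)]
      refine Prod.ext rfl (Prod.ext (by push_cast; ring) rfl)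
    · rw [if_neg hgt, if_pos (by omega : ex > x), ih (x+1) y ex (t+1) _ (by omega)]
      refine Prod.ext rfl (Prod.ext (by push_cast; ring) rfl)

theorem pvWalkY_spec : ∀ (n : Nat) (x y ey t : Int) (p : PySem.Set (Int × Int × Int)),
    (y - ey).natAbs = n →
    pvWalkY n x y ey t p = (ey, t + n, PySem.Set.update p (pvEnum t (pvSegY x y ey))) := by
  intro n
  induction n with
  | zero =>
    intro x y ey t p h
    have hy : y = ey := by omega
    rw [pvSegY, dif_pos hy]
    simp only [pvWalkY, pvEnum, PySem.Set.update, List.foldl_nil]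
    simp [hy]
  | succ m ih =>
    intro x y ey t p h
    have hne : y ≠ ey := by omega
    rw [pvSegY, dif_neg hne]
    simp only [pvWalkY, if_neg hne, pvEnum, PySem.Set.update, List.foldl_cons]
    by_cases hgt : y > ey
    · rw [if_pos hgt, if_neg (by omega : ¬ ey > y), ih x (y-1) ey (t+1) _ (by omega)]
      refine Prod.ext rfl (Prod.ext (by push_cast; ring) rfl)
    · rw [if_neg hgt, if_pos (by omega : ey > y), ih x (y+1) ey (t+1) _ (by omega)]
      refine Prod.ext rfl (Prod.ext (by push_cast; ring) rfl)

-- the loop body of findPath's 'for i in range(len(route)-1)'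
def pvStepA (points : List (List Int))
    (st : Option (Int × PySem.Set (Int × Int × Int))) (o1 o2 : Option Int) :
    Option (Int × PySem.Set (Int × Int × Int)) :=
  match st with
  | none => none
  | some (time, path) =>
    match o1, o2 with
    | some ri, some rj =>
      match PySem.List.pyGet? points (ri - 1), PySem.List.pyGet? points (rj - 1) with
      | some start, some stop =>
        match start with
        | [x, y] =>
          match PySem.List.pyGet? stop 0, PySem.List.pyGet? stop 1 with
          | some e0, some e1 =>
            match pvWalkX ((x - e0).natAbs) x y e0 time path with
            | (x1, t1, p1) =>
              match pvWalkY ((y - e1).natAbs) x1 y e1 t1 p1 with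
              | (_, t2, p2) => some (t2, PySem.Set.add p2 (e0, e1, t2))
          | _, _ => none
        | _ => none
      | _, _ => none
    | _, _ => none

theorem pvFindPath_eq (points : List (List Int)) (route : List Int) :
    pvFindPath points route =
      ((PySem.List.pyRange 0 ((route.length : Int) - 1) 1).foldl
        (fun st i => pvStepA points st (PySem.List.pyGet? route i) (PySem.List.pyGet? route (i + 1)))
        (some (0, PySem.Set.empty))).map (·.2) := rfl

theorem pvPairsFold : ∀ {σ : Type} (route : List Int) (g : σ → Option Int → Option Int → σ) (st : σ),
    (PySem.List.pyRange 0 ((route.length : Int) - 1) 1).foldl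
      (fun st i => g st (PySem.List.pyGet? route i) (PySem.List.pyGet? route (i + 1))) st
    = (route.zip route.tail).foldl (fun st ab => g st (some ab.1) (some ab.2)) st := by
  intro σ route
  induction route with
  | nil => intro g st; simp [PySem.List.pyRange_one_eq_nil]
  | cons a rest ih =>
    intro g st
    match rest with
    | [] => simp [PySem.List.pyRange_one_eq_nil]
    | b :: rest' =>
      rw [PySem.List.pyRange_one]
      have hlen : (((a :: b :: rest').length : Int) - 1 - 0).toNat = rest'.length + 1 := by simp
      rw [hlen, List.range_succ_eq_map]
      simp only [List.map_cons, List.foldl_cons, List.map_map, List.foldl_map]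
      simp only [Nat.cast_zero]
      have h0 : PySem.List.pyGet? (a :: b :: rest') ((0:Int) + 0) = some a := by
        norm_num [PySem.List.pyGet?_zero_cons]
      have h1 : PySem.List.pyGet? (a :: b :: rest') ((0:Int) + 0 + 1) = some b := by
        norm_num
      rw [h0, h1]
      have := ih (fun st i => g st i) (g st (some a) (some b))
      rw [PySem.List.pyRange_one] at this
      simp only [List.foldl_map] at this ⊢
      have hlen2 : (((b :: rest').length : Int) - 1 - 0).toNat = rest'.length := by simp
      rw [hlen2] at this
      conv_rhs => rw [show ((a::b::rest').zip (a::b::rest').tail) = (a,b) :: ((b::rest').zip (b::rest').tail) from rfl]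
      rw [List.foldl_cons]
      rw [← this]
      apply PySem.List.foldl_congr_mem
      intro acc k hk
      congr 1
      · rw [show ((fun (k : Nat) => (0:Int) + (k:Int)) ∘ Nat.succ) k = ((k+1 : Nat) : Int) by
            simp only [Function.comp_apply]; omega,
          show (0:Int) + (k:Int) = ((k:Nat) : Int) by omega,
          PySem.List.pyGet?_natCast, PySem.List.pyGet?_natCast]
        simp
      · rw [show ((fun (k : Nat) => (0:Int) + (k:Int)) ∘ Nat.succ) k + 1 = ((k+2 : Nat) : Int) by
            simp only [Function.comp_apply]; omega,
          show (0:Int) + (k:Int) + 1 = ((k+1 : Nat) : Int) by omega,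
          PySem.List.pyGet?_natCast, PySem.List.pyGet?_natCast]
        simp

-- coordinates of the point a route entry references (total under Pre_)
def pvCoord (points : List (List Int)) (a : Int) : Int × Int :=
  (((PySem.List.pyGet? points (a - 1)).getD []).getD 0 0,
   ((PySem.List.pyGet? points (a - 1)).getD []).getD 1 0)

theorem pvCoord_pair {points : List (List Int)} {a : Int}
    (h : (PySem.List.pyGet? points (a - 1)).map List.length = some 2) :
    PySem.List.pyGet? points (a - 1) = some [(pvCoord points a).1, (pvCoord points a).2] := by
  cases hg : PySem.List.pyGet? points (a - 1) with
  | none => rw [hg] at h; simp at h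
  | some l =>
    rw [hg] at h
    simp only [Option.map_some, Option.some.injEq] at h
    obtain ⟨u, v, rfl⟩ := List.length_eq_two.mp h
    simp [pvCoord, hg]

theorem pvCoord_long {points : List (List Int)} {a : Int}
    (h : 2 ≤ ((PySem.List.pyGet? points (a - 1)).getD []).length) :
    ∃ p, PySem.List.pyGet? points (a - 1) = some p ∧
      PySem.List.pyGet? p 0 = some (pvCoord points a).1 ∧
      PySem.List.pyGet? p 1 = some (pvCoord points a).2 := by
  cases hg : PySem.List.pyGet? points (a - 1) with
  | none => rw [hg] at h; simp at h
  | some l =>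
    rw [hg] at h
    simp only [Option.getD_some] at h
    match l, h with
    | u :: v :: rest, _ =>
      refine ⟨u :: v :: rest, rfl, ?_, ?_⟩
      · rw [show (0 : Int) = ((0 : Nat) : Int) by norm_num, PySem.List.pyGet?_natCast]
        simp [pvCoord, hg]
      · rw [show (1 : Int) = ((1 : Nat) : Int) by norm_num, PySem.List.pyGet?_natCast]
        simp [pvCoord, hg]

-- absorb the duplicated segment-junction triple
theorem pvUpdate_absorb {α : Type} [BEq α] [LawfulBEq α] (acc : PySem.Set α) (l1 l2 : List α)
    (z : α) (hz : z ∈ l2.head?) :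
    PySem.Set.update (PySem.Set.update acc (l1 ++ [z])) l2 = PySem.Set.update acc (l1 ++ l2) := by
  match l2, hz with
  | z' :: l2', hz =>
    have hzz : z' = z := by simpa using hz
    subst hzz
    simp only [PySem.Set.update_append, PySem.Set.update_cons, PySem.Set.update_nil]
    congr 1
    have : z' ∈ PySem.Set.add (PySem.Set.update acc l1) z' := by
      rw [PySem.Set.mem_add]; exact Or.inr rfl
    exact PySem.Set.add_of_mem this

theorem pvAFold_chain (points : List (List Int)) :
    ∀ (rest : List Int) (a : Int) (time : Int) (acc : PySem.Set (Int × Int × Int)),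
    (∀ x ∈ (a :: rest).dropLast, (PySem.List.pyGet? points (x - 1)).map List.length = some 2) →
    (∀ x ∈ (a :: rest), 2 ≤ ((PySem.List.pyGet? points (x - 1)).getD []).length) →
    ((a :: rest).zip rest).foldl (fun st ab => pvStepA points st (some ab.1) (some ab.2))
      (some (time, acc))
    = some (time + (pvSteps (pvCoord points a) (rest.map (pvCoord points)) : Int),
        if rest = [] then acc
        else PySem.Set.update acc
          (pvEnum time (pvChain (pvCoord points a) (rest.map (pvCoord points))))) := by
  intro rest
  induction rest with
  | nil => intro a time acc _ _; simp [pvSteps]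
  | cons b rest' ih =>
    intro a time acc Hd Hall
    have ha : PySem.List.pyGet? points (a - 1)
        = some [(pvCoord points a).1, (pvCoord points a).2] := by
      apply pvCoord_pair
      apply Hd
      rw [List.dropLast_cons_of_ne_nil (by simp)]
      exact List.mem_cons_self
    obtain ⟨p, hp, hp0, hp1⟩ := pvCoord_long (points := points) (a := b)
      (Hall b (by simp))
    set ca := pvCoord points a with hca
    set cb := pvCoord points b with hcb
    have hzip : ((a :: b :: rest').zip (b :: rest'))
        = (a, b) :: ((b :: rest').zip rest') := rfl
    rw [hzip, List.foldl_cons]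
    have hstep : pvStepA points (some (time, acc)) (some a) (some b)
        = some (time + ((ca.1 - cb.1).natAbs : Int) + ((ca.2 - cb.2).natAbs : Int),
            PySem.Set.update acc
              (pvEnum time (pvSegPos ca cb)
                ++ [(cb.1, cb.2, time + ((ca.1 - cb.1).natAbs : Int) + ((ca.2 - cb.2).natAbs : Int))])) := by
      simp only [pvStepA, ha, hp, hp0, hp1]
      rw [pvWalkX_spec ((ca.1 - cb.1).natAbs) ca.1 ca.2 cb.1 time acc rfl]
      simp only
      rw [pvWalkY_spec ((ca.2 - cb.2).natAbs) cb.1 ca.2 cb.2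
        (time + ((ca.1 - cb.1).natAbs : Int)) _ rfl]
      simp only [Option.some.injEq]
      refine Prod.ext rfl ?_
      simp only [pvSegPos, pvEnum_append, pvSegX_len, PySem.Set.update_append]
      rfl
    rw [hstep]
    have Hd' : ∀ x ∈ (b :: rest').dropLast,
        Option.map List.length (PySem.List.pyGet? points (x - 1)) = some 2 := by
      intro x hx
      apply Hd
      rw [List.dropLast_cons_of_ne_nil (by simp)]
      exact List.mem_cons_of_mem a hx
    have Hall' : ∀ x ∈ b :: rest',
        2 ≤ ((PySem.List.pyGet? points (x - 1)).getD []).length := by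
      intro x hx; exact Hall x (List.mem_cons_of_mem a hx)
    rw [ih b _ _ Hd' Hall']
    have htime : ∀ T : Int, T + ((ca.1 - cb.1).natAbs : Int) + ((ca.2 - cb.2).natAbs : Int)
        = T + (((ca.1 - cb.1).natAbs + (ca.2 - cb.2).natAbs : Nat) : Int) := by
      intro T; push_cast; ring
    by_cases hr : rest' = []
    · subst hr
      rw [if_pos rfl, if_neg (show ¬ ((b : Int) :: ([] : List Int)) = [] by simp)]
      rw [Option.some.injEq, Prod.mk.injEq]
      have hlen : ((pvSegPos ca cb).length : Int)
          = ((ca.1 - cb.1).natAbs : Int) + ((ca.2 - cb.2).natAbs : Int) := by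
        rw [pvSegPos, List.length_append, pvSegX_len, pvSegY_len]; push_cast; ring
      have hassoc : time + (((ca.1 - cb.1).natAbs : Int) + ((ca.2 - cb.2).natAbs : Int))
          = time + ((ca.1 - cb.1).natAbs : Int) + ((ca.2 - cb.2).natAbs : Int) := by ring
      constructor
      · simp only [List.map_nil, List.map_cons, pvSteps]; push_cast; ring
      · simp only [List.map_nil, List.map_cons]
        rw [show pvChain ca [cb] = pvSegPos ca cb ++ [cb] from rfl]
        rw [pvEnum_append, hlen, hassoc]
        rfl
    · rw [if_neg hr, if_neg (show ¬ (b :: rest') = [] from List.cons_ne_nil b rest')]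
      rw [Option.some.injEq, Prod.mk.injEq]
      have hlen : ((pvSegPos ca cb).length : Int)
          = ((ca.1 - cb.1).natAbs : Int) + ((ca.2 - cb.2).natAbs : Int) := by
        rw [pvSegPos, List.length_append, pvSegX_len, pvSegY_len]; push_cast; ring
      have hassoc : time + (((ca.1 - cb.1).natAbs : Int) + ((ca.2 - cb.2).natAbs : Int))
          = time + ((ca.1 - cb.1).natAbs : Int) + ((ca.2 - cb.2).natAbs : Int) := by ring
      constructor
      · simp only [List.map_cons, pvSteps]; push_cast; ring
      · obtain ⟨tl, htl⟩ := pvChain_cons (rest'.map (pvCoord points)) cb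
        have habs := pvUpdate_absorb acc
          (pvEnum time (pvSegPos ca cb))
          (pvEnum (time + ((ca.1 - cb.1).natAbs : Int) + ((ca.2 - cb.2).natAbs : Int))
            (pvChain cb (rest'.map (pvCoord points))))
          (cb.1, cb.2, time + ((ca.1 - cb.1).natAbs : Int) + ((ca.2 - cb.2).natAbs : Int))
          (by rw [htl]; simp [pvEnum])
        rw [show pvCoord points b = cb from rfl]
        rw [habs, List.map_cons]
        rw [show pvChain ca (cb :: rest'.map (pvCoord points))
            = pvSegPos ca cb ++ pvChain cb (rest'.map (pvCoord points)) from rfl]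
        rw [pvEnum_append, hlen, hassoc]

-- ---------- A-side: counting dict ----------

def pvDictStep (d : PySem.Dict (Int × Int × Int) Int) (point : Int × Int × Int) :
    PySem.Dict (Int × Int × Int) Int :=
  match PySem.Dict.get? d point with
  | some c => PySem.Dict.insert d point (c + 1)
  | none => PySem.Dict.insert d point 1

-- robot of one route, if the route has at least two stops
def pvToRobot (points : List (List Int)) : List Int → Option ((Int × Int) × List (Int × Int))
  | [] => none
  | a :: rest =>
    if 2 ≤ (a :: rest : List Int).length
    then some (pvCoord points a, rest.map (pvCoord points)) else none

-- triples one route contributes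
def pvCellsOf (points : List (List Int)) (r : List Int) : List (Int × Int × Int) :=
  match pvToRobot points r with
  | some rb => pvEnum 0 (pvTrace rb.1 rb.2)
  | none => []

theorem pvAFold (points : List (List Int)) :
    ∀ (routes : List (List Int)) (d : PySem.Dict (Int × Int × Int) Int),
    (∀ r ∈ routes, pvFindPath points r = some (pvCellsOf points r)) →
    routes.foldl
      (fun st route =>
        match st with
        | none => none
        | some d =>
          match pvFindPath points route with
          | none => none
          | some path =>
            some (path.foldl
              (fun d point =>
                match PySem.Dict.get? d point with
                | some c => PySem.Dict.insert d point (c + 1)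
                | none => PySem.Dict.insert d point 1) d))
      (some d)
    = some ((routes.flatMap (pvCellsOf points)).foldl pvDictStep d) := by
  intro routes
  induction routes with
  | nil => intro d _; simp
  | cons r rest ih =>
    intro d h
    rw [List.foldl_cons, h r (by simp), List.flatMap_cons, List.foldl_append]
    have hl : (fun (d : PySem.Dict (Int × Int × Int) Int) point =>
        match PySem.Dict.get? d point with
        | some c => PySem.Dict.insert d point (c + 1)
        | none => PySem.Dict.insert d point 1) = pvDictStep := rfl
    rw [hl]
    exact ih _ (fun r' hm => h r' (by simp [hm]))

theorem pvDictStep_eq (d : PySem.Dict (Int × Int × Int) Int) (x : Int × Int × Int) :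
    pvDictStep d x = PySem.Dict.insert d x (PySem.Dict.getD d x 0 + 1) := by
  unfold pvDictStep
  cases h : PySem.Dict.get? d x with
  | none => simp [PySem.Dict.getD_eq_get?_getD, h]
  | some c => simp [PySem.Dict.getD_eq_get?_getD, h]

theorem pvDictFold_eq (l : List (Int × Int × Int)) (d : PySem.Dict (Int × Int × Int) Int) :
    l.foldl pvDictStep d = l.foldl (fun d x => PySem.Dict.insert d x (PySem.Dict.getD d x 0 + 1)) d := by
  congr 1
  funext d x
  exact pvDictStep_eq d x

theorem pvDictFold_getD (l : List (Int × Int × Int)) (v : Int × Int × Int) :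
    PySem.Dict.getD (l.foldl pvDictStep PySem.Dict.empty) v 0 = (l.count v : Int) := by
  rw [pvDictFold_eq, PySem.Dict.getD_foldl_insert_add_one]
  simp

theorem pvDictFold_keys (l : List (Int × Int × Int)) :
    (l.foldl pvDictStep PySem.Dict.empty).keys = PySem.Set.ofList l := by
  rw [pvDictFold_eq, PySem.Dict.keys_foldl_insert]
  simp [PySem.Set.update_nil_left]

-- ---------- duplicate counting ----------

def pvCountDup {α : Type} [BEq α] [LawfulBEq α] [DecidableEq α] (l : List α) : Int :=
  ((PySem.Set.ofList l).countP (fun x => decide (2 ≤ l.count x)) : Int)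

theorem pvCountDup_perm {α : Type} [BEq α] [LawfulBEq α] [DecidableEq α] {l l' : List α} (h : l.Perm l') :
    pvCountDup l = pvCountDup l' := by
  unfold pvCountDup
  congr 1
  have hofl : (PySem.Set.ofList l).Perm (PySem.Set.ofList l') := by
    rw [List.perm_ext_iff_of_nodup (PySem.Set.nodup_ofList l) (PySem.Set.nodup_ofList l')]
    intro x
    rw [PySem.Set.mem_ofList, PySem.Set.mem_ofList]
    exact h.mem_iff
  calc (PySem.Set.ofList l).countP (fun x => decide (2 ≤ l.count x))
      = (PySem.Set.ofList l).countP (fun x => decide (2 ≤ l'.count x)) := by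
        apply List.countP_congr
        intro x _
        rw [h.count_eq]
    _ = (PySem.Set.ofList l').countP (fun x => decide (2 ≤ l'.count x)) :=
        hofl.countP_eq _

theorem pvCountDup_map {α β : Type} [BEq α] [LawfulBEq α] [DecidableEq α] [BEq β] [LawfulBEq β] [DecidableEq β] {f : α → β}
    (hf : Function.Injective f) (l : List α) :
    pvCountDup (l.map f) = pvCountDup l := by
  have hof : ∀ m : List α, PySem.Set.ofList (m.map f) = (PySem.Set.ofList m).map f := by
    intro m
    induction m using List.reverseRecOn with
    | nil => rfl
    | append_singleton m x ih =>
      rw [List.map_append, List.map_cons, List.map_nil, PySem.Set.ofList_append_singleton,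
        PySem.Set.ofList_append_singleton, ih, PySem.Set.add_eq_ite, PySem.Set.add_eq_ite]
      by_cases hx : x ∈ PySem.Set.ofList m
      · rw [if_pos hx, if_pos (List.mem_map_of_mem hx)]
      · rw [if_neg hx, if_neg (fun hmem => ?_), List.map_append, List.map_cons, List.map_nil]
        obtain ⟨y, hy, hyx⟩ := List.mem_map.mp hmem
        exact hx (hf hyx ▸ hy)
  unfold pvCountDup
  congr 1
  rw [hof, List.countP_map]
  apply List.countP_congr
  intro x _
  simp only [Function.comp_apply]
  rw [List.count_map_of_injective l f hf x]

theorem pvCountDup_disjoint {α : Type} [BEq α] [LawfulBEq α] [DecidableEq α] (l1 l2 : List α)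
    (h : ∀ x ∈ l1, x ∉ l2) :
    pvCountDup (l1 ++ l2) = pvCountDup l1 + pvCountDup l2 := by
  unfold pvCountDup
  have hsplit : PySem.Set.ofList (l1 ++ l2) = PySem.Set.ofList l1 ++ PySem.Set.ofList l2 := by
    rw [PySem.Set.ofList_append, PySem.Set.update_eq_append_filter]
    congr 1
    apply List.filter_eq_self.mpr
    intro y hy
    have hy2 : y ∈ l2 := (PySem.Set.mem_ofList _ _).mp hy
    have hy1 : y ∉ l1 := fun h1 => h y h1 hy2
    have hc : PySem.Set.contains (PySem.Set.ofList l1) y = false := by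
      cases hcc : PySem.Set.contains (PySem.Set.ofList l1) y with
      | false => rfl
      | true =>
        exact absurd ((PySem.Set.mem_ofList _ _).mp ((PySem.Set.contains_iff _ _).mp hcc)) hy1
    rw [hc]
    rfl
  rw [hsplit, List.countP_append]
  push_cast
  congr 1
  · apply congrArg
    apply List.countP_congr
    intro x hx
    have hx1 : x ∈ l1 := (PySem.Set.mem_ofList _ _).mp hx
    rw [List.count_append, List.count_eq_zero.mpr (h x hx1)]
    simp
  · apply congrArg
    apply List.countP_congr
    intro x hx
    have hx2 : x ∈ l2 := (PySem.Set.mem_ofList _ _).mp hx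
    have hx1 : x ∉ l1 := fun hmem => h x hmem hx2
    rw [List.count_append, List.count_eq_zero.mpr hx1]
    simp

-- the per-tick seen/dup loop
def pvPairStep (sd : PySem.Set (Int × Int) × PySem.Set (Int × Int)) (x : Int × Int) :
    PySem.Set (Int × Int) × PySem.Set (Int × Int) :=
  if PySem.Set.contains sd.1 x then (sd.1, PySem.Set.add sd.2 x)
  else (PySem.Set.add sd.1 x, sd.2)

-- the dup set holds exactly the positions occurring at least twice
theorem pvPairFold_inv (l : List (Int × Int)) :
    (l.foldl pvPairStep (PySem.Set.empty, PySem.Set.empty)).1 = PySem.Set.ofList l ∧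
    (l.foldl pvPairStep (PySem.Set.empty, PySem.Set.empty)).2.Nodup ∧
    (∀ y, y ∈ (l.foldl pvPairStep (PySem.Set.empty, PySem.Set.empty)).2 ↔ 2 ≤ l.count y) := by
  induction l using List.reverseRecOn with
  | nil => refine ⟨rfl, List.nodup_nil, fun y => ?_⟩; simp [PySem.Set.empty]
  | append_singleton l x ih =>
    obtain ⟨h1, h2, h3⟩ := ih
    rw [List.foldl_append, List.foldl_cons, List.foldl_nil]
    simp only [pvPairStep]
    by_cases hx : x ∈ l
    · have hc : PySem.Set.contains (List.foldl pvPairStep (PySem.Set.empty, PySem.Set.empty) l).1 x := by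
        rw [PySem.Set.contains_iff, h1, PySem.Set.mem_ofList]; exact hx
      rw [if_pos hc]
      refine ⟨?_, ?_, ?_⟩
      · rw [h1, PySem.Set.ofList_append_singleton, PySem.Set.add_of_mem]
        rw [PySem.Set.mem_ofList]; exact hx
      · exact PySem.Set.nodup_add _ _ h2
      · intro y
        rw [PySem.Set.mem_add, h3 y, List.count_append]
        by_cases hy : y = x
        · subst hy
          have : 0 < l.count y := List.count_pos_iff.mpr hx
          simp
          omega
        · have hxy : x ≠ y := fun h => hy h.symm
          simp [hxy]
          exact fun h => absurd h hy
    · have hc : ¬ PySem.Set.contains (List.foldl pvPairStep (PySem.Set.empty, PySem.Set.empty) l).1 x := by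
        rw [PySem.Set.contains_iff, h1, PySem.Set.mem_ofList]; exact hx
      rw [if_neg hc]
      refine ⟨?_, h2, ?_⟩
      · rw [h1, PySem.Set.ofList_append_singleton]
      · intro y
        rw [h3 y, List.count_append]
        by_cases hy : y = x
        · subst hy
          have : l.count y = 0 := List.count_eq_zero.mpr hx
          simp [this]
        · have hxy : x ≠ y := fun h => hy h.symm
          simp [hxy]

theorem pvDupCount_eq (robots : List ((Int × Int) × List (Int × Int))) :
    pvDupCount robots = pvCountDup (robots.map (·.1)) := by
  unfold pvDupCount pvCountDup
  have hfm : robots.foldl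
      (fun (sd : PySem.Set (Int × Int) × PySem.Set (Int × Int)) r =>
        if PySem.Set.contains sd.1 r.1 then (sd.1, PySem.Set.add sd.2 r.1)
        else (PySem.Set.add sd.1 r.1, sd.2)) (PySem.Set.empty, PySem.Set.empty)
      = (robots.map (·.1)).foldl pvPairStep (PySem.Set.empty, PySem.Set.empty) := by
    rw [List.foldl_map]
    rfl
  rw [hfm]
  obtain ⟨h1, h2, h3⟩ := pvPairFold_inv (robots.map (·.1))
  set l := robots.map (·.1) with hl
  have hperm : ((PySem.Set.ofList l).filter (fun x => decide (2 ≤ l.count x))).Perm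
      (l.foldl pvPairStep (PySem.Set.empty, PySem.Set.empty)).2 := by
    rw [List.perm_ext_iff_of_nodup (List.Nodup.filter _ (PySem.Set.nodup_ofList l)) h2]
    intro a
    rw [List.mem_filter, PySem.Set.mem_ofList, h3 a, decide_eq_true_eq]
    constructor
    · exact fun h => h.2
    · intro h
      exact ⟨List.count_pos_iff.mp (by omega), h⟩
  rw [List.countP_eq_length_filter, hperm.length_eq]
  simp [PySem.Set.len]

-- ---------- B-side: the simulation counts duplicated (cell, time) pairs ----------

theorem pvFlatMap_cons_perm {α β : Type} (l : List α) (f : α → β) (g : α → List β) :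
    (l.flatMap (fun x => f x :: g x)).Perm (l.map f ++ l.flatMap g) := by
  induction l with
  | nil => simp
  | cons x xs ih =>
    rw [List.flatMap_cons, List.map_cons, List.flatMap_cons, List.cons_append,
      List.cons_append]
    refine List.Perm.cons (f x) ?_
    refine List.Perm.trans (List.Perm.append_left (g x) ih) ?_
    exact List.perm_append_comm_assoc _ _ _

theorem pvFlatMap_filterMap {α β γ : Type} (l : List α) (f : α → Option β) (g : β → List γ) :
    (l.filterMap f).flatMap g
      = l.flatMap (fun x => match f x with | some y => g y | none => []) := by
  induction l with
  | nil => rfl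
  | cons x xs ih =>
    rw [List.filterMap_cons, List.flatMap_cons]
    cases h : f x with
    | none => rw [ih]; rfl
    | some y => rw [List.flatMap_cons, ih]

def pvShift (z : Int × Int × Int) : Int × Int × Int := (z.1, z.2.1, z.2.2 + 1)

def pvTailTrace (rb : (Int × Int) × List (Int × Int)) : List (Int × Int) :=
  match pvMoveRobot rb with
  | none => []
  | some r' => pvTrace r'.1 r'.2

theorem pvEnum_trace_split (rb : (Int × Int) × List (Int × Int)) :
    pvEnum 0 (pvTrace rb.1 rb.2)
      = (rb.1.1, rb.1.2, 0) :: (pvEnum 0 (pvTailTrace rb)).map pvShift := by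
  have hsh : ∀ l, pvEnum 1 l = (pvEnum 0 l).map pvShift := by
    intro l
    have := pvEnum_shift l 0
    norm_num at this
    exact this
  unfold pvTailTrace
  cases h : pvMoveRobot rb with
  | none => rw [pvTrace_of_none (by rw [← h])]; rfl
  | some r' =>
    rw [pvTrace_of_some (by rw [← h])]
    simp only [pvEnum]
    rw [← hsh]
    norm_num

theorem pvMeasure_pos {robots : List ((Int × Int) × List (Int × Int))}
    (h : robots ≠ []) : 0 < pvMeasure robots := by
  cases robots with
  | nil => exact absurd rfl h
  | cons r rest => simp only [pvMeasure, List.map_cons, List.sum_cons]; omega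

theorem pvSimAux_eq : ∀ (N : Nat) (robots : List ((Int × Int) × List (Int × Int))),
    pvMeasure robots ≤ N →
    pvSimAux N robots = pvCountDup (robots.flatMap (fun rb => pvEnum 0 (pvTrace rb.1 rb.2))) := by
  intro N
  induction N with
  | zero =>
    intro robots h
    cases robots with
    | nil => rfl
    | cons r rest => exact absurd h (by have := pvMeasure_pos (List.cons_ne_nil r rest); omega)
  | succ N ih =>
    intro robots h
    by_cases hr : robots = []
    · subst hr; rfl
    · rw [pvSimAux, if_neg hr]
      rw [show (fun (rb : (Int × Int) × List (Int × Int)) => pvEnum 0 (pvTrace rb.1 rb.2))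
          = (fun rb => (rb.1.1, rb.1.2, 0) :: (pvEnum 0 (pvTailTrace rb)).map pvShift)
          from funext pvEnum_trace_split]
      rw [pvCountDup_perm (pvFlatMap_cons_perm robots _ _)]
      rw [pvCountDup_disjoint _ _ ?disj]
      case disj =>
        intro x hx hmem
        obtain ⟨rb, _, hrb⟩ := List.mem_map.mp hx
        obtain ⟨rb', _, hz⟩ := List.mem_flatMap.mp hmem
        obtain ⟨z, hz1, hz2⟩ := List.mem_map.mp hz
        have := pvEnum_time_ge hz1
        rw [← hrb] at hz2
        have h1z : ((0:Int) + 1) ≤ (pvShift z).2.2 := by simp [pvShift]; omega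
        rw [hz2] at h1z
        simp at h1z
      have hdup : pvCountDup (robots.map (fun rb => (rb.1.1, rb.1.2, (0:Int))))
          = pvDupCount robots := by
        rw [show (fun (rb : (Int × Int) × List (Int × Int)) => (rb.1.1, rb.1.2, (0:Int)))
            = (fun (p : Int × Int) => (p.1, p.2, (0:Int))) ∘ (fun rb => rb.1) from rfl]
        rw [← List.map_map]
        rw [pvCountDup_map (f := fun (p : Int × Int) => (p.1, p.2, (0:Int)))
          (fun a b hab => by
            simp only [Prod.mk.injEq] at hab
            exact Prod.ext hab.1 hab.2.1)]
        rw [pvDupCount_eq]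
      have htail : robots.flatMap (fun rb => (pvEnum 0 (pvTailTrace rb)).map pvShift)
          = (robots.flatMap (fun rb => pvEnum 0 (pvTailTrace rb))).map pvShift := by
        rw [List.map_flatMap]
      have hshiftinj : Function.Injective pvShift := by
        intro a b hab
        simp only [pvShift, Prod.mk.injEq] at hab
        exact Prod.ext hab.1 (Prod.ext hab.2.1 (by omega))
      have hmoved : robots.flatMap (fun rb => pvEnum 0 (pvTailTrace rb))
          = (pvMoveAll robots).flatMap (fun rb => pvEnum 0 (pvTrace rb.1 rb.2)) := by
        rw [pvMoveAll_eq, pvFlatMap_filterMap]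
        congr 1
        funext rb
        unfold pvTailTrace
        cases pvMoveRobot rb with
        | none => rfl
        | some r' => rfl
      rw [hdup, htail, pvCountDup_map hshiftinj, hmoved,
        ih (pvMoveAll robots) (by have := pvMeasure_moveAll_lt hr; omega)]

-- ---------- initialisation ----------

theorem pvMemTail {r : List Int} {x : Int} (hx : x ∈ r.tail) :
    x ∈ r.dropLast ∨ r.getLast? = some x := by
  have gen : ∀ (l : List Int), x ∈ l → x ∈ l.dropLast ∨ l.getLast? = some x := by
    intro l
    induction l with
    | nil => intro h; simp at h
    | cons a rs ih =>
      intro h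
      cases rs with
      | nil =>
        right
        simp only [List.mem_singleton] at h
        rw [h]
        rfl
      | cons b rs' =>
        rcases List.mem_cons.mp h with h | h
        · left
          rw [h, List.dropLast_cons_of_ne_nil (List.cons_ne_nil b rs')]
          exact List.mem_cons_self
        · rcases ih h with h' | h'
          · left
            rw [List.dropLast_cons_of_ne_nil (List.cons_ne_nil b rs')]
            exact List.mem_cons_of_mem a h'
          · right
            rw [List.getLast?_cons_cons]
            exact h'
  cases r with
  | nil => simp at hx
  | cons a rs =>
    simp only [List.tail_cons] at hx
    cases rs with
    | nil => simp at hx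
    | cons b rs' =>
      rcases gen (b :: rs') hx with h' | h'
      · left
        rw [List.dropLast_cons_of_ne_nil (List.cons_ne_nil b rs')]
        exact List.mem_cons_of_mem a h'
      · right
        rw [List.getLast?_cons_cons]
        exact h'

theorem pvMkTargets_eq {points : List (List Int)} {rest : List Int}
    (h : ∀ x ∈ rest, 2 ≤ ((PySem.List.pyGet? points (x - 1)).getD []).length) :
    pvMkTargets points rest = some (rest.map (pvCoord points)) := by
  unfold pvMkTargets
  induction rest with
  | nil => rfl
  | cons x xs ih =>
    obtain ⟨p, hp, hp0, hp1⟩ := pvCoord_long (points := points) (a := x) (h x (by simp))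
    rw [List.mapM_cons]
    simp only [hp, hp0, hp1]
    rw [ih (fun y hy => h y (List.mem_cons_of_mem x hy))]
    rfl

theorem pvInitRobots_eq {points : List (List Int)} {routes : List (List Int)}
    (h : Pre_solution points routes) :
    pvInitRobots points routes = some (routes.filterMap (pvToRobot points)) := by
  unfold pvInitRobots
  have gen : ∀ (rs : List (List Int)) (acc : List ((Int × Int) × List (Int × Int))),
      (∀ r ∈ rs, 2 ≤ r.length →
        (∀ a ∈ r.dropLast, (PySem.List.pyGet? points (a - 1)).map List.length = some 2) ∧
        (∀ a ∈ r.getLast?, 2 ≤ ((PySem.List.pyGet? points (a - 1)).getD []).length)) →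
      rs.foldl
        (fun st route =>
          match st with
          | none => none
          | some rs =>
            if 2 ≤ route.length then
              match route with
              | a :: rest =>
                match PySem.List.pyGet? points (a - 1) with
                | some [x, y] =>
                  match pvMkTargets points rest with
                  | some ts => some (rs ++ [((x, y), ts)])
                  | none => none
                | _ => none
              | [] => none
            else some rs) (some acc)
        = some (acc ++ rs.filterMap (pvToRobot points)) := by
    intro rs
    induction rs with
    | nil => intro acc _; simp
    | cons r rs' ih =>
      intro acc hpre
      rw [List.foldl_cons, List.filterMap_cons]
      by_cases hlen : 2 ≤ r.length
      · match r, hlen with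
        | a :: rest, hlen =>
          have hrest : rest ≠ [] := by
            intro hr; rw [hr] at hlen; simp at hlen
          obtain ⟨Hd, Hl⟩ := hpre (a :: rest) (by simp) hlen
          have ha : PySem.List.pyGet? points (a - 1)
              = some [(pvCoord points a).1, (pvCoord points a).2] := by
            apply pvCoord_pair
            apply Hd
            rw [List.dropLast_cons_of_ne_nil hrest]
            exact List.mem_cons_self
          have hall : ∀ x ∈ rest, 2 ≤ ((PySem.List.pyGet? points (x - 1)).getD []).length := by
            intro x hx
            rcases pvMemTail (r := a :: rest) (by simpa using hx) with h' | h'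
            · have := Hd x h'
              cases hg : PySem.List.pyGet? points (x - 1) with
              | none => rw [hg] at this; simp at this
              | some p =>
                rw [hg] at this
                simp only [Option.map_some, Option.some.injEq] at this
                simp [this]
            · exact Hl x h'
          simp only [if_pos hlen, ha, pvMkTargets_eq hall]
          rw [ih _ (fun r' hr' => hpre r' (List.mem_cons_of_mem _ hr'))]
          rw [show pvToRobot points (a :: rest)
              = some (pvCoord points a, rest.map (pvCoord points)) from by
            simp only [pvToRobot, if_pos hlen]]
          simp
      · have hnone : pvToRobot points r = none := by
          cases r with
          | nil => rfl
          | cons a rest => simp only [pvToRobot, if_neg hlen]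
        rw [hnone]
        simp only [if_neg hlen]
        exact ih acc (fun r' hr' => hpre r' (List.mem_cons_of_mem _ hr'))
  exact gen routes [] h

theorem pvFindPath_spec {points : List (List Int)} {r : List Int}
    (h2 : 2 ≤ r.length →
      (∀ a ∈ r.dropLast, (PySem.List.pyGet? points (a - 1)).map List.length = some 2) ∧
      (∀ a ∈ r.getLast?, 2 ≤ ((PySem.List.pyGet? points (a - 1)).getD []).length)) :
    pvFindPath points r = some (pvCellsOf points r) := by
  match r with
  | [] => rfl
  | [a] => rfl
  | a :: b :: rest =>
    obtain ⟨Hd, Hl⟩ := h2 (by simp)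
    have Hall : ∀ x ∈ a :: b :: rest,
        2 ≤ ((PySem.List.pyGet? points (x - 1)).getD []).length := by
      intro x hx
      have hdl : x ∈ (a :: b :: rest).dropLast ∨ (a :: b :: rest).getLast? = some x := by
        rcases List.mem_cons.mp hx with h' | h'
        · left
          rw [h', List.dropLast_cons_of_ne_nil (List.cons_ne_nil b rest)]
          exact List.mem_cons_self
        · exact pvMemTail (r := a :: b :: rest) (by simpa using h')
      rcases hdl with h' | h'
      · have := Hd x h'
        cases hg : PySem.List.pyGet? points (x - 1) with
        | none => rw [hg] at this; simp at this
        | some p =>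
          rw [hg] at this
          simp only [Option.map_some, Option.some.injEq] at this
          simp [this]
      · exact Hl x h'
    rw [pvFindPath_eq, pvPairsFold]
    rw [show (a :: b :: rest).tail = b :: rest from rfl]
    rw [pvAFold_chain points (b :: rest) a 0 PySem.Set.empty Hd Hall]
    rw [if_neg (List.cons_ne_nil b rest)]
    simp only [Option.map_some]
    simp only [pvCellsOf, pvToRobot,
      if_pos (show 2 ≤ (a :: b :: rest : List Int).length by simp)]
    rw [pvTrace_eq_chain (pvSteps (pvCoord points a) ((b :: rest).map (pvCoord points))
        + ((b :: rest).map (pvCoord points)).length) _ _ (le_refl _)]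
    rw [show PySem.Set.update PySem.Set.empty
        (pvEnum 0 (pvChain (pvCoord points a) ((b :: rest).map (pvCoord points))))
        = PySem.Set.ofList
          (pvEnum 0 (pvChain (pvCoord points a) ((b :: rest).map (pvCoord points))))
      from PySem.Set.update_nil_left _]
    rw [PySem.Set.ofList_eq_self_of_nodup _ (pvEnum_nodup _ _)]


-- ===== VERDICT (by name: the statement is the Claim_ definition above) =====
theorem solution_spec : Claim_equal_solution := by
  intro points routes _hdom hpre
  unfold Spec_solution
  have hfind : ∀ r ∈ routes, pvFindPath points r = some (pvCellsOf points r) :=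
    fun r hr => pvFindPath_spec (fun h2 => hpre r hr h2)
  unfold solution solution_alt
  rw [pvAFold points routes PySem.Dict.empty hfind, pvInitRobots_eq hpre]
  simp only []
  rw [show pvSim (routes.filterMap (pvToRobot points))
      = pvSimAux (pvMeasure (routes.filterMap (pvToRobot points)))
          (routes.filterMap (pvToRobot points)) from rfl]
  rw [pvSimAux_eq (pvMeasure (routes.filterMap (pvToRobot points))) _ (le_refl _)]
  have hflatB : (routes.filterMap (pvToRobot points)).flatMap
      (fun rb => pvEnum 0 (pvTrace rb.1 rb.2)) = routes.flatMap (pvCellsOf points) := by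
    rw [pvFlatMap_filterMap]
    congr 1
    funext r
    unfold pvCellsOf
    cases pvToRobot points r <;> rfl
  rw [hflatB]
  show (((routes.flatMap (pvCellsOf points)).foldl pvDictStep PySem.Dict.empty).items.foldl
      (fun answer kc => if kc.2 ≥ 2 then answer + 1 else answer) 0)
    = pvCountDup (routes.flatMap (pvCellsOf points))
  set flat := routes.flatMap (pvCellsOf points) with hflat
  rw [PySem.List.foldl_ite_add_one]
  have hnd : ((flat).foldl pvDictStep PySem.Dict.empty).keys.Nodup := by
    rw [pvDictFold_keys]; exact PySem.Set.nodup_ofList _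
  rw [PySem.Dict.items_eq_map_keys _ hnd 0, List.countP_map, pvDictFold_keys]
  have hcp : ∀ a ∈ PySem.Set.ofList flat,
      ((fun (kc : (Int × Int × Int) × Int) => decide (kc.2 ≥ 2)) ∘
        (fun k => (k, PySem.Dict.getD (flat.foldl pvDictStep PySem.Dict.empty) k 0))) a = true
      ↔ (fun k => decide (2 ≤ flat.count k)) a = true := by
    intro a _
    simp only [Function.comp_apply, pvDictFold_getD, ge_iff_le, decide_eq_true_eq]
    exact ⟨fun h => by exact_mod_cast h, fun h => by exact_mod_cast h⟩
  rw [List.countP_congr hcp]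
  unfold pvCountDup
  norm_num
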